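-- pv_equiv track=rewrite | github.com/Vanshthakur-sus/project-of-vansh-thakur | ptython_ki_file_hai_bhai.py | tick_rule
-- ===== SOURCE A (Python) =====
-- def tick_rule(prices):
--     directions = [0]
--     for i in range(1, len(prices)):
--         if prices[i] > prices[i-1]:
--             directions.append(1)
--         elif prices[i] < prices[i-1]:
--             directions.append(-1)
--         else:
--             directions.append(directions[-1])
--     return directions
-- ===== SOURCE B (Python) =====
-- def tick_rule(prices):
--     # For each index i, scan backwards for the most recent price that differs
--     # from prices[i]; the direction is the sign of that comparison (0 if none).
--     # No running state is carried between indices.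
--     def direction(i):
--         x = prices[i]
--         for j in range(i - 1, -1, -1):
--             if prices[j] != x:
--                 return 1 if x > prices[j] else -1
--         return 0
--     return [direction(i) for i in range(len(prices))]
-- ===== Notes on version B (the rewrite author's own statement) =====
-- stated objective: alternative
-- what changed: A is a single forward loop carrying the previous direction as running state; B carries no state at all: for each index it scans backwards for the most recent price that differs and returns the sign of that comparison (a per-index backward search instead of a forward fill).
-- intended difference: On the empty price list A returns a spurious one-element direction list containing a single zero, produced by its unconditional seed, while B returns the empty list; a direction list of the same length as the input is the intended value. — e.g. on tick_rule([]): A returns [0], B returns []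
import Mathlib
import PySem

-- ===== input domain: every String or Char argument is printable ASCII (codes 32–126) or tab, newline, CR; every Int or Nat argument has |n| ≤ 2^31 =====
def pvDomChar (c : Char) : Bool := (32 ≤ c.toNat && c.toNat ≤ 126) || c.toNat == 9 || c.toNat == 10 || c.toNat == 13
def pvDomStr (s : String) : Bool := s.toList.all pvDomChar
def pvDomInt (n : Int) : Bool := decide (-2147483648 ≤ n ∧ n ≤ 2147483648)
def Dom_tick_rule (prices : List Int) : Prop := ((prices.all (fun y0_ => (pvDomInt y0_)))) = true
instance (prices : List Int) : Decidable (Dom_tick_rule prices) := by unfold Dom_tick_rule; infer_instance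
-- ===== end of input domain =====

-- B replaces A's forward loop with carried state by a stateless per-index backward search
-- for the most recent differing price (alternative decomposition, not claimed faster);
-- on the empty list A returns a one-element list and B the empty list (output length = input length).


-- ===== PORT A =====
-- literal transliteration: for i in range(1, len(prices)): append ±1 or directions[-1]
def tick_rule (prices : List Int) : List Int :=
  (PySem.List.pyRange 1 (prices.length : Int) 1).foldl
    (fun dirs i =>
      if PySem.List.pyGetD prices i 0 > PySem.List.pyGetD prices (i - 1) 0 then dirs ++ [1]
      else if PySem.List.pyGetD prices i 0 < PySem.List.pyGetD prices (i - 1) 0 then dirs ++ [-1]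
      else dirs ++ [PySem.List.pyGetD dirs (-1) 0])
    [0]

-- ===== PORT B =====
-- inner 'for j in range(i-1,-1,-1)' of Source B, as a descending recursion: with k indices
-- left it inspects index k-1; all accesses prices[j] are in range, so getD is exact
def pvScanK (prices : List Int) (x : Int) : Nat → Int
  | 0 => 0
  | k+1 =>
    if prices.getD k 0 ≠ x then (if x > prices.getD k 0 then 1 else -1)
    else pvScanK prices x k

-- '[direction(i) for i in range(len(prices))]'
def tick_rule_alt (prices : List Int) : List Int :=
  (List.range prices.length).map (fun i => pvScanK prices (prices.getD i 0) i)

-- ===== PRECONDITION & SPEC =====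
-- On the empty price list A returns a spurious one-element direction list containing a single
-- zero (its unconditional seed) while B returns the empty list; same-length output is intended.
def D_tick_rule (prices : List Int) : Prop := prices = []
instance (prices : List Int) : Decidable (D_tick_rule prices) := by unfold D_tick_rule; infer_instance

def Spec_tick_rule (prices : List Int) (out : List Int) : Prop := ¬ D_tick_rule prices → out = tick_rule_alt prices
instance (prices : List Int) (out : List Int) : Decidable (Spec_tick_rule prices out) := by unfold Spec_tick_rule; infer_instance

def pvDiffWitness_tick_rule : List Int := []
def pvDiffWitnessOut_tick_rule : (List Int) × (List Int) := ([0], [])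

-- ===== CLAIM (what is proved, stated in full; the proofs are below) =====
def Claim_unchanged_tick_rule : Prop := ∀ (prices : List Int), Dom_tick_rule prices → Spec_tick_rule prices (tick_rule prices)
def Claim_changed_tick_rule : Prop := Dom_tick_rule (pvDiffWitness_tick_rule) ∧ D_tick_rule (pvDiffWitness_tick_rule) ∧ tick_rule (pvDiffWitness_tick_rule) = pvDiffWitnessOut_tick_rule.1 ∧ tick_rule_alt (pvDiffWitness_tick_rule) = pvDiffWitnessOut_tick_rule.2 ∧ pvDiffWitnessOut_tick_rule.1 ≠ pvDiffWitnessOut_tick_rule.2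
def Claim_exact_tick_rule : Prop := ∀ (prices : List Int), Dom_tick_rule prices → D_tick_rule prices → tick_rule prices ≠ tick_rule_alt prices

-- ===== LEMMAS AND PROOFS =====

-- reference function both ports are reduced to
def pvGo (prev last : Int) : List Int → List Int
  | [] => []
  | q :: qs =>
    let d := if q > prev then (1 : Int) else if q < prev then -1 else last
    d :: pvGo q d qs

def pvSpec : List Int → List Int
  | [] => [0]
  | p :: ps => 0 :: pvGo p 0 ps

lemma pvGo_snoc (ps : List Int) (prev last x : Int) :
    pvGo prev last (ps ++ [x]) =
      pvGo prev last ps ++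
        [if x > ps.getLastD prev then (1 : Int)
         else if x < ps.getLastD prev then -1
         else (pvGo prev last ps).getLastD last] := by
  induction ps generalizing prev last with
  | nil => simp [pvGo]
  | cons q qs ih =>
    simp only [List.cons_append, pvGo, List.getLastD_cons]
    rw [ih]

lemma pvSpec_snoc (xs : List Int) (x : Int) (h : xs ≠ []) :
    pvSpec (xs ++ [x]) =
      pvSpec xs ++
        [if x > xs.getLastD 0 then (1 : Int)
         else if x < xs.getLastD 0 then -1
         else (pvSpec xs).getLastD 0] := by
  cases xs with
  | nil => exact absurd rfl h
  | cons p ps =>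
    show (0 :: pvGo p 0 (ps ++ [x])) =
      (0 :: pvGo p 0 ps) ++
        [if x > (p :: ps).getLastD 0 then (1 : Int)
         else if x < (p :: ps).getLastD 0 then -1
         else (0 :: pvGo p 0 ps).getLastD 0]
    rw [pvGo_snoc, List.getLastD_cons, List.getLastD_cons]
    simp

lemma foldl_ne_nil_of_extends (f : List Int → Int → List Int)
    (hf : ∀ acc i, ∃ t, f acc i = acc ++ [t]) :
    ∀ (l : List Int) (acc : List Int), acc ≠ [] → l.foldl f acc ≠ [] := by
  intro l
  induction l with
  | nil => intro acc h; simpa using h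
  | cons a t ih =>
    intro acc h
    obtain ⟨v, hv⟩ := hf acc a
    simpa [hv] using ih (acc ++ [v]) (by simp)

-- the body of A's loop, named so lemmas can talk about it
def pvAStep (prices : List Int) (dirs : List Int) (i : Int) : List Int :=
  if PySem.List.pyGetD prices i 0 > PySem.List.pyGetD prices (i - 1) 0 then dirs ++ [1]
  else if PySem.List.pyGetD prices i 0 < PySem.List.pyGetD prices (i - 1) 0 then dirs ++ [-1]
  else dirs ++ [PySem.List.pyGetD dirs (-1) 0]

lemma pvAStep_extends (prices : List Int) : ∀ acc i, ∃ t, pvAStep prices acc i = acc ++ [t] := by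
  intro acc i
  unfold pvAStep
  split_ifs <;> exact ⟨_, rfl⟩

lemma tick_rule_eq_foldl (prices : List Int) :
    tick_rule prices = (PySem.List.pyRange 1 (prices.length : Int) 1).foldl (pvAStep prices) [0] := rfl

lemma tick_rule_ne_nil (prices : List Int) : tick_rule prices ≠ [] := by
  rw [tick_rule_eq_foldl]
  exact foldl_ne_nil_of_extends _ (pvAStep_extends prices) _ _ (by simp)

-- A's value at one snoc step
lemma tick_rule_snoc (xs : List Int) (x : Int) (h : xs ≠ []) :
    tick_rule (xs ++ [x]) =
      tick_rule xs ++
        [if x > xs.getLastD 0 then (1 : Int)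
         else if x < xs.getLastD 0 then -1
         else (tick_rule xs).getLastD 0] := by
  have hlen : (0 : Int) < xs.length := by exact_mod_cast List.length_pos_iff.mpr h
  rw [tick_rule_eq_foldl, tick_rule_eq_foldl]
  have hlen2 : ((xs ++ [x]).length : Int) = (xs.length : Int) + 1 := by simp
  rw [hlen2, PySem.List.pyRange_one_succ_right (by omega), List.foldl_append]
  have hcongr :
      (PySem.List.pyRange 1 (xs.length : Int) 1).foldl (pvAStep (xs ++ [x])) [0]
      = (PySem.List.pyRange 1 (xs.length : Int) 1).foldl (pvAStep xs) [0] := by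
    apply PySem.List.foldl_congr_mem
    intro acc i hi
    rw [PySem.List.mem_pyRange_one] at hi
    unfold pvAStep
    have e1 : PySem.List.pyGetD (xs ++ [x]) i 0 = PySem.List.pyGetD xs i 0 := by
      rw [PySem.List.pyGetD_eq_getElem (xs ++ [x]) 0 (by omega) (by rw [hlen2]; omega),
          PySem.List.pyGetD_eq_getElem xs 0 (by omega) (by omega)]
      exact List.getElem_append_left (by omega)
    have e2 : PySem.List.pyGetD (xs ++ [x]) (i - 1) 0 = PySem.List.pyGetD xs (i - 1) 0 := by
      rw [PySem.List.pyGetD_eq_getElem (xs ++ [x]) 0 (by omega) (by rw [hlen2]; omega),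
          PySem.List.pyGetD_eq_getElem xs 0 (by omega) (by omega)]
      exact List.getElem_append_left (by omega)
    rw [e1, e2]
  rw [hcongr, ← tick_rule_eq_foldl]
  -- the last iteration, i = xs.length
  have ex : PySem.List.pyGetD (xs ++ [x]) (xs.length : Int) 0 = x := by
    rw [PySem.List.pyGetD_eq_getElem (xs ++ [x]) 0 (by omega) (by rw [hlen2]; omega)]
    simp
  have eprev : PySem.List.pyGetD (xs ++ [x]) ((xs.length : Int) - 1) 0 = xs.getLastD 0 := by
    rw [PySem.List.pyGetD_eq_getElem (xs ++ [x]) 0 (by omega) (by rw [hlen2]; omega)]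
    rw [List.getElem_append_left (by omega)]
    rw [List.getLastD_eq_getLast?, List.getLast?_eq_getElem?,
        List.getElem?_eq_getElem (by omega : xs.length - 1 < xs.length)]
    simp only [Option.getD_some]
    congr 1
    omega
  have elast : PySem.List.pyGetD (tick_rule xs) (-1) 0 = (tick_rule xs).getLastD 0 := by
    rw [PySem.List.pyGetD_neg_one _ _ (tick_rule_ne_nil xs)]
    rw [List.getLastD_eq_getLast?, List.getLast?_eq_some_getLast (tick_rule_ne_nil xs), Option.getD_some]
  simp only [List.foldl_cons, List.foldl_nil, pvAStep]
  rw [ex, eprev, elast]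
  split_ifs <;> rfl

lemma A_eq_spec (prices : List Int) : tick_rule prices = pvSpec prices := by
  induction prices using List.reverseRecOn with
  | nil => rfl
  | append_singleton xs x ih =>
    cases xs with
    | nil =>
      rw [tick_rule_eq_foldl]
      simp only [List.nil_append]
      rw [show (([x] : List Int).length : Int) = 1 by simp, PySem.List.pyRange_one_eq_nil (by omega)]
      rfl
    | cons p ps =>
      rw [tick_rule_snoc _ _ (by simp), ih, pvSpec_snoc _ _ (by simp)]

-- B-side: the backward scan ignores an appended element when it only looks below it
lemma pvScanK_append (xs : List Int) (x y : Int) (k : Nat) (hk : k ≤ xs.length) :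
    pvScanK (xs ++ [x]) y k = pvScanK xs y k := by
  induction k with
  | zero => rfl
  | succ m ih =>
    have hg : (xs ++ [x]).getD m 0 = xs.getD m 0 := by
      simp [List.getD, List.getElem?_append_left (by omega : m < xs.length)]
    simp only [pvScanK, hg, ih (by omega)]

lemma getD_last (xs : List Int) (h : xs ≠ []) :
    xs.getD (xs.length - 1) 0 = xs.getLastD 0 := by
  rw [List.getD, List.getElem?_eq_getElem (by
        have := List.length_pos_iff.mpr h; omega),
      List.getLastD_eq_getLast?, List.getLast?_eq_getElem?,
      List.getElem?_eq_getElem (by have := List.length_pos_iff.mpr h; omega)]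

-- B's value at one snoc step
lemma alt_snoc (xs : List Int) (x : Int) (h : xs ≠ []) :
    tick_rule_alt (xs ++ [x]) =
      tick_rule_alt xs ++
        [if x > xs.getLastD 0 then (1 : Int)
         else if x < xs.getLastD 0 then -1
         else (tick_rule_alt xs).getLastD 0] := by
  have hpos : 0 < xs.length := List.length_pos_iff.mpr h
  obtain ⟨m, hm⟩ : ∃ m, xs.length = m + 1 := ⟨xs.length - 1, by omega⟩
  unfold tick_rule_alt
  rw [List.length_append, List.length_singleton, List.range_succ, List.map_append]
  congr 1
  · -- prefix: indices below xs.length see only xs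
    apply List.map_congr_left
    intro i hi
    rw [List.mem_range] at hi
    have hg : (xs ++ [x]).getD i 0 = xs.getD i 0 := by
      simp [List.getD, List.getElem?_append_left hi]
    rw [hg, pvScanK_append _ _ _ _ (by omega)]
  · -- last element, index xs.length = m + 1
    have hx : (xs ++ [x]).getD xs.length 0 = x := by
      simp [List.getD]
    simp only [List.map_cons, List.map_nil, hx]
    congr 1
    rw [hm]
    have hg : (xs ++ [x]).getD m 0 = xs.getD m 0 := by
      simp [List.getD, List.getElem?_append_left (by omega : m < xs.length)]
    have hlastD : xs.getD m 0 = xs.getLastD 0 := by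
      have := getD_last xs h; rw [hm] at this; simpa using this
    have hL : (List.map (fun i => pvScanK xs (xs.getD i 0) i) (List.range (m + 1))).getLastD 0
        = pvScanK xs (xs.getD m 0) m := by
      rw [List.range_succ, List.map_append]
      simp
    show pvScanK (xs ++ [x]) x (m + 1) = _
    simp only [pvScanK, hg, hlastD]
    by_cases hne : xs.getLastD 0 = x
    · rw [if_neg (not_not_intro hne), if_neg (by omega), if_neg (by omega),
          pvScanK_append _ _ _ _ (by omega), hL, hlastD, hne]
    · rw [if_pos hne]
      rcases lt_trichotomy (xs.getLastD 0) x with hlt | heq | hgt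
      · rw [if_pos hlt, if_pos hlt]
      · exact absurd heq hne
      · rw [if_neg (by omega), if_neg (by omega), if_pos hgt]

lemma alt_eq_spec (prices : List Int) (h : prices ≠ []) : tick_rule_alt prices = pvSpec prices := by
  induction prices using List.reverseRecOn with
  | nil => exact absurd rfl h
  | append_singleton xs x ih =>
    cases xs with
    | nil => simp [tick_rule_alt, pvSpec, pvGo, pvScanK, List.range_succ]
    | cons p ps =>
      rw [alt_snoc _ _ (by simp), ih (by simp), pvSpec_snoc _ _ (by simp)]

-- ===== VERDICT (by name: the statements are the Claim_ definitions above) =====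
theorem tick_rule_spec : Claim_unchanged_tick_rule := by
  intro prices _ hD
  rw [A_eq_spec, alt_eq_spec prices hD]

theorem tick_rule_changed : Claim_changed_tick_rule := by
  unfold Claim_changed_tick_rule; decide

theorem tick_rule_tight : Claim_exact_tick_rule := by
  intro prices _ hD
  subst hD
  decide
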